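-- pv_equiv track=rewrite | github.com/MarcosBianchii/Teoria-de-Algoritmos | guias/division_y_conquista/12.py | alternar
-- ===== SOURCE A (Python) =====
-- def alternar(arr):
--     """
--     T(n) = aT(n/b) + O(n^c)
--
--     a = 2
--     b = 2
--     c = 1
--
--     log_b(a) = c -> T(n) = O(n^c logn) = O(nlogn)
--     """
--     def alternar_rec(a, b):
--         if b - a >= 4:
--             mid = (a + b) // 2
--             alternar_rec(a, mid)
--             alternar_rec(mid, b)
--
--             for i in range(0, mid - a, 2):
--                 arr[a + i + 1], arr[mid + i] = arr[mid + i], arr[a + i + 1]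
--
--     alternar_rec(0, len(arr))
--     return arr
-- ===== SOURCE B (Python) =====
-- def alternar(arr):
--     # Explicit-stack version: discover segments pre-order (right child first),
--     # then replay the swap loop over them in reverse (children before parents).
--     segs = []
--     stack = [(0, len(arr))]
--     while stack:
--         a, b = stack.pop()
--         if b - a >= 4:
--             segs.append((a, b))
--             mid = (a + b) // 2
--             stack.append((a, mid))
--             stack.append((mid, b))
--     for a, b in reversed(segs):
--         mid = (a + b) // 2
--         for i in range(0, mid - a, 2):
--             arr[a + i + 1], arr[mid + i] = arr[mid + i], arr[a + i + 1]
--     return arr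
-- ===== Notes on version B (the rewrite author's own statement) =====
-- stated objective: alternative
-- what changed: Replaces the divide-and-conquer recursion by an explicit stack that collects the segments in pre-order (right child first) and then replays the identical swap loop over the collected segments in reverse, so every child segment is processed before its parent.
import Mathlib
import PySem

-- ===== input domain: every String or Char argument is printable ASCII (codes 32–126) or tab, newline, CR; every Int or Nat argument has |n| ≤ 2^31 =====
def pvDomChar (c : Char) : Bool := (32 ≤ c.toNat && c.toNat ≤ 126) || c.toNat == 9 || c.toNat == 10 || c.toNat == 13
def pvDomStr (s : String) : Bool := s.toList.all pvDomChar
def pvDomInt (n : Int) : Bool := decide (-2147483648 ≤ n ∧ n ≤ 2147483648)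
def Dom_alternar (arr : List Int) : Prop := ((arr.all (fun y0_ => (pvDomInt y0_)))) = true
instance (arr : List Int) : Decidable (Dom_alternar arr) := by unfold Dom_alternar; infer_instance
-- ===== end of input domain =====

-- B replaces A's divide-and-conquer recursion by an explicit stack that discovers the
-- segments and replays the same swap loop over them in reverse (objective: alternative
-- decomposition, same cost). Python A mutates arr in place; equivalence is about the
-- return value (B performs the same in-place mutation in Python).

-- ===== PORT A =====
-- simultaneous swap arr[p], arr[q] = arr[q], arr[p] (all swaps in both programs are in range)
def pvSwap2 (l : List Int) (p q : Nat) : List Int :=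
  match l[p]?, l[q]? with
  | some x, some y => (l.set p y).set q x
  | _, _ => l

-- for i in range(0, mid - a, 2): arr[a+i+1], arr[mid+i] = arr[mid+i], arr[a+i+1]
def pvDoSwaps (a mid : Nat) (l : List Int) : List Int :=
  (PySem.List.pyRange 0 (mid - a : Nat) 2).foldl
    (fun l i => pvSwap2 l (a + i.toNat + 1) (mid + i.toNat)) l

def alternarRec (a b : Nat) (l : List Int) : List Int :=
  if b - a ≥ 4 then
    let mid := (a + b) / 2
    pvDoSwaps a mid (alternarRec mid b (alternarRec a mid l))
  else l
termination_by b - a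
decreasing_by all_goals omega

def alternar (arr : List Int) : List Int :=
  alternarRec 0 arr.length arr

-- ===== PORT B =====
-- the while-stack loop collecting the segments in discovery order
def pvCollect (stack : List (Nat × Nat)) (segs : List (Nat × Nat)) : List (Nat × Nat) :=
  match stack with
  | [] => segs
  | (a, b) :: st =>
    if b - a ≥ 4 then
      let mid := (a + b) / 2
      pvCollect ((mid, b) :: (a, mid) :: st) (segs ++ [(a, b)])
    else pvCollect st segs
termination_by 2 * (stack.map (fun p => 2 * (p.2 - p.1) - 3)).sum + stack.length
decreasing_by all_goals simp only [List.map_cons, List.sum_cons, List.length_cons]; omega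

def alternar_alt (arr : List Int) : List Int :=
  (pvCollect [(0, arr.length)] []).reverse.foldl
    (fun l p => pvDoSwaps p.1 ((p.1 + p.2) / 2) l) arr

-- ===== PRECONDITION & SPEC =====
def Spec_alternar (arr : List Int) (out : List Int) : Prop := out = alternar_alt arr
instance (arr : List Int) (out : List Int) : Decidable (Spec_alternar arr out) := by unfold Spec_alternar; infer_instance

-- ===== CLAIM (what is proved, stated in full; the proofs are below) =====
def Claim_equal_alternar : Prop := ∀ (arr : List Int), Dom_alternar arr → Spec_alternar arr (alternar arr)

-- ===== LEMMAS AND PROOFS =====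

-- the discovery-order (pre-order, right child first) segment list of one root segment
def pvDisc (a b : Nat) : List (Nat × Nat) :=
  if b - a ≥ 4 then
    (a, b) :: (pvDisc ((a + b) / 2) b ++ pvDisc a ((a + b) / 2))
  else []
termination_by b - a
decreasing_by all_goals omega

-- the stack loop computes segs ++ concatenation of the discovery lists of the stack entries
theorem pvDisc_pos (a b : Nat) (h : b - a ≥ 4) :
    pvDisc a b = (a, b) :: (pvDisc ((a + b) / 2) b ++ pvDisc a ((a + b) / 2)) := by
  rw [pvDisc.eq_def, if_pos h]

theorem pvDisc_neg (a b : Nat) (h : ¬ b - a ≥ 4) : pvDisc a b = [] := by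
  rw [pvDisc.eq_def, if_neg h]

theorem pvCollect_eq (stack : List (Nat × Nat)) (segs : List (Nat × Nat)) :
    pvCollect stack segs = segs ++ (stack.map (fun p => pvDisc p.1 p.2)).flatten := by
  fun_induction pvCollect stack segs with
  | case1 segs => simp
  | case2 segs a b st h mid ih =>
      rw [ih]
      simp only [List.map_cons, List.flatten_cons]
      rw [pvDisc_pos a b h]
      simp only [List.cons_append, List.append_assoc]
      rfl
  | case3 segs a b st h ih =>
      rw [ih]
      simp only [List.map_cons, List.flatten_cons]
      rw [pvDisc_neg a b h]
      simp

-- reversed discovery order = post-order (left child first), i.e. A's swap order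
theorem alternarRec_pos (a b : Nat) (l : List Int) (h : b - a ≥ 4) :
    alternarRec a b l =
      pvDoSwaps a ((a + b) / 2) (alternarRec ((a + b) / 2) b (alternarRec a ((a + b) / 2) l)) := by
  rw [alternarRec.eq_def, if_pos h]

theorem alternarRec_neg (a b : Nat) (l : List Int) (h : ¬ b - a ≥ 4) :
    alternarRec a b l = l := by
  rw [alternarRec.eq_def, if_neg h]

-- folding the swap loop over A's swap order is A's recursion
theorem foldl_reverse_disc (n : Nat) : ∀ (a b : Nat) (l : List Int), b - a ≤ n →
    (pvDisc a b).reverse.foldl (fun l p => pvDoSwaps p.1 ((p.1 + p.2) / 2) l) l =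
      alternarRec a b l := by
  induction n with
  | zero =>
      intro a b l hn
      rw [pvDisc_neg a b (by omega), alternarRec_neg a b l (by omega)]
      simp
  | succ n ih =>
      intro a b l hn
      by_cases h : b - a ≥ 4
      · rw [pvDisc_pos a b h, alternarRec_pos a b l h]
        simp only [List.reverse_cons, List.reverse_append, List.foldl_append,
          List.foldl_cons, List.foldl_nil]
        rw [ih a ((a + b) / 2) l (by omega),
          ih ((a + b) / 2) b (alternarRec a ((a + b) / 2) l) (by omega)]
      · rw [pvDisc_neg a b h, alternarRec_neg a b l h]
        simp

-- ===== VERDICT (by name: the statement is the Claim_ definition above) =====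
theorem alternar_spec : Claim_equal_alternar := by
  intro arr _
  show alternar arr = alternar_alt arr
  unfold alternar alternar_alt
  rw [pvCollect_eq]
  simp only [List.map_cons, List.map_nil, List.flatten_cons, List.flatten_nil,
    List.append_nil, List.nil_append]
  exact (foldl_reverse_disc arr.length 0 arr.length arr (by omega)).symm
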